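-- pv_equiv track=rewrite | github.com/LuisYnwa/beecrowd-exercises | ex3204bee.py | count_walks
-- ===== SOURCE A (Python) =====
-- def count_walks(n):
--     dp = [[[0] * (n + 1) for _ in range(25)] for _ in range(25)]
--     dp[12][12][0] = 1 #[x] [y] sao usadas para armazenar o numero de caminho ate o destino e o terceiro [] eh a quantidade de passos
--     directions = [(1, 0), (-1, 0), (0, 1), (0, -1), (1, -1), (-1, 1)] #as seis coordenadas possiveis de um favo de mel
--
--     for steps in range(1, n + 1):
--         for x in range(25):
--             for y in range(25):
--                 dp[x][y][steps] = 0
--                 for dx, dy in directions: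
--                     nx, ny = x + dx, y + dy
--                     if 0 <= nx < 25 and 0 <= ny < 25: #verificacao se ambos estao nos limites 25x25 da matriz
--                         dp[x][y][steps] += dp[nx][ny][steps - 1]
--
--     return dp[12][12][n]
-- ===== SOURCE B (Python) =====
-- def count_walks(n):
--     # Meet-in-the-middle: walks of length n that return to (12,12) split at step
--     # n//2 into a first half center->p and a second half p->center; reversing the
--     # second half (the direction set is closed under negation) makes it another
--     # center->p walk, so the answer is the dot product of the two half
--     # distributions: sum_p f_{n//2}(p) * f_{n-n//2}(p).
--     directions = [(1, 0), (-1, 0), (0, 1), (0, -1), (1, -1), (-1, 1)]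
--
--     def step(cur):
--         nxt = [[0] * 25 for _ in range(25)]
--         for x in range(25):
--             for y in range(25):
--                 c = cur[x][y]
--                 if c:
--                     for dx, dy in directions:
--                         nx, ny = x + dx, y + dy
--                         if 0 <= nx < 25 and 0 <= ny < 25:
--                             nxt[nx][ny] += c
--         return nxt
--
--     half = [[0] * 25 for _ in range(25)]
--     half[12][12] = 1
--     for _ in range(n // 2):
--         half = step(half)
--     other = step(half) if n % 2 else half
--     return sum(half[x][y] * other[x][y] for x in range(25) for y in range(25))
-- ===== Notes on version B (the rewrite author's own statement) =====
-- stated objective: faster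
-- what changed: Replaces A's n-layer backward DP over a full 25x25x(n+1) table with meet-in-the-middle: B runs only ceil(n/2) forward DP steps from the center and returns the dot product of the step-(n//2) and step-(n-n//2) distributions, correct because reversing the second half of a closed walk (the hex direction set is closed under negation) turns it into another center-to-p walk.
-- outside the precondition, e.g. on count_walks(-1): A raises IndexError, B returns 0
import Mathlib
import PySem

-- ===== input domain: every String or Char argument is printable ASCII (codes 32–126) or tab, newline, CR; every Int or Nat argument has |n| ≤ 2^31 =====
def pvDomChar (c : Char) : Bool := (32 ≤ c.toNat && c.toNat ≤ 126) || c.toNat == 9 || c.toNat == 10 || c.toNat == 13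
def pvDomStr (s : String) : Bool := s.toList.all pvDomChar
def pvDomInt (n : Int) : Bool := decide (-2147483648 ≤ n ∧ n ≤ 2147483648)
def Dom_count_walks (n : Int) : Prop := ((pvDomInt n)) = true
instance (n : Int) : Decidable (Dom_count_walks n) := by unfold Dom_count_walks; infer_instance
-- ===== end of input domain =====

-- B replaces A's n-layer DP over the full 25x25x(n+1) table with MEET IN THE MIDDLE:
-- it runs only ceil(n/2) forward DP steps from the center and returns the dot product
-- of the step-(n//2) and step-(n-n//2) distributions; correct because reversing the
-- second half of a walk (the hex direction set is closed under negation) turns it into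
-- another center-to-p walk. Objective: faster (about half the DP steps; measured).

-- ===== PORT A =====
-- the six hex directions (shared literal of both sources)
def pvDirs : List (Int × Int) := [(1, 0), (-1, 0), (0, 1), (0, -1), (1, -1), (-1, 1)]

-- dp[x][y][z] on the 3D table (Python lists are arrays: O(1) indexing)
def pvGet3 (dp : Array (Array (Array Int))) (x y z : Nat) : Int :=
  ((dp.getD x #[]).getD y #[]).getD z 0

-- dp[x][y][z] = v on the 3D table
def pvSet3 (dp : Array (Array (Array Int))) (x y z : Nat) (v : Int) :
    Array (Array (Array Int)) :=
  dp.setIfInBounds x ((dp.getD x #[]).setIfInBounds y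
    (((dp.getD x #[]).getD y #[]).setIfInBounds z v))

-- the inner 'for dx, dy in directions' accumulation of A
def pvGather (dp : Array (Array (Array Int))) (x y steps : Int) : Int :=
  pvDirs.foldl (fun acc d =>
    if 0 ≤ x + d.1 ∧ x + d.1 < 25 ∧ 0 ≤ y + d.2 ∧ y + d.2 < 25 then
      acc + pvGet3 dp (x + d.1).toNat (y + d.2).toNat (steps - 1).toNat
    else acc) 0

-- one 'steps' iteration of A: the x/y double loop writing layer 'steps'
def pvStepA (dp : Array (Array (Array Int))) (steps : Int) : Array (Array (Array Int)) :=
  (PySem.List.pyRange 0 25 1).foldl (fun dp x =>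
    (PySem.List.pyRange 0 25 1).foldl (fun dp y =>
      pvSet3 dp x.toNat y.toNat steps.toNat (pvGather dp x y steps)) dp) dp

def count_walks (n : Int) : Int :=
  let dp0 := ((PySem.List.pyRange 0 25 1).map (fun _ =>
    ((PySem.List.pyRange 0 25 1).map (fun _ =>
      Array.replicate (n + 1).toNat (0 : Int))).toArray)).toArray
  let dp1 := pvSet3 dp0 12 12 0 1
  let dp2 := (PySem.List.pyRange 1 (n + 1) 1).foldl pvStepA dp1
  pvGet3 dp2 12 12 n.toNat

-- ===== PORT B =====
-- cur[x][y] on a 25x25 grid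
def pvGet2 (g : Array (Array Int)) (x y : Nat) : Int := (g.getD x #[]).getD y 0

-- cur[x][y] = v on a 25x25 grid
def pvSet2 (g : Array (Array Int)) (x y : Nat) (v : Int) : Array (Array Int) :=
  g.setIfInBounds x ((g.getD x #[]).setIfInBounds y v)

-- a fresh zero grid: [[0]*25 for _ in range(25)]
def pvZeros : Array (Array Int) :=
  ((PySem.List.pyRange 0 25 1).map (fun _ => Array.replicate 25 (0 : Int))).toArray

-- push one nonzero cell's count into its six in-range neighbours of nxt
def pvPush (cur nxt : Array (Array Int)) (x y : Int) : Array (Array Int) :=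
  let c := pvGet2 cur x.toNat y.toNat
  if c ≠ 0 then
    pvDirs.foldl (fun nxt d =>
      if 0 ≤ x + d.1 ∧ x + d.1 < 25 ∧ 0 ≤ y + d.2 ∧ y + d.2 < 25 then
        pvSet2 nxt (x + d.1).toNat (y + d.2).toNat
          (pvGet2 nxt (x + d.1).toNat (y + d.2).toNat + pvGet2 cur x.toNat y.toNat)
      else nxt) nxt
  else nxt

-- B's helper step(cur): scatter every cell of cur into a fresh grid
def pvStepB (cur : Array (Array Int)) : Array (Array Int) :=
  (PySem.List.pyRange 0 25 1).foldl (fun nxt x =>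
    (PySem.List.pyRange 0 25 1).foldl (fun nxt y => pvPush cur nxt x y) nxt) pvZeros

def count_walks_alt (n : Int) : Int :=
  let half0 := pvSet2 pvZeros 12 12 1
  let half := (PySem.List.pyRange 0 (PySem.Int.floordiv n 2) 1).foldl
    (fun cur _ => pvStepB cur) half0
  let other := if PySem.Int.mod n 2 ≠ 0 then pvStepB half else half
  ((PySem.List.pyRange 0 25 1).flatMap (fun x =>
    (PySem.List.pyRange 0 25 1).map (fun y =>
      pvGet2 half x.toNat y.toNat * pvGet2 other x.toNat y.toNat))).sum

-- ===== PRECONDITION & SPEC =====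
-- Pre_ excludes n < 0, on which A raises IndexError (dp[12][12][0] = 1 into a length-0 list)
def Pre_count_walks (n : Int) : Prop := 0 ≤ n
instance (n : Int) : Decidable (Pre_count_walks n) := by unfold Pre_count_walks; infer_instance
def pvWitness_count_walks : Int := (3)

def Spec_count_walks (n : Int) (out : Int) : Prop := out = count_walks_alt n
instance (n : Int) (out : Int) : Decidable (Spec_count_walks n out) := by unfold Spec_count_walks; infer_instance

-- ===== CLAIM (what is proved, stated in full; the proofs are below) =====
def Claim_equal_count_walks : Prop := ∀ (n : Int), Dom_count_walks n → Pre_count_walks n → Spec_count_walks n (count_walks n)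

-- ===== LEMMAS AND PROOFS =====

-- the mathematical layer function: number of bounded hex walks of length s from (x,y) to (12,12)
def pvG : Nat → Int → Int → Int
  | 0, x, y => if x = 12 ∧ y = 12 then 1 else 0
  | s + 1, x, y =>
      if 0 ≤ x ∧ x < 25 ∧ 0 ≤ y ∧ y < 25 then
        (pvDirs.map (fun d => pvG s (x + d.1) (y + d.2))).sum
      else 0

theorem pvG_out (s : Nat) (x y : Int) (h : ¬(0 ≤ x ∧ x < 25 ∧ 0 ≤ y ∧ y < 25)) :
    pvG s x y = 0 := by
  cases s <;> simp only [pvG] <;> [skip; simp [h]]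
  have : ¬(x = 12 ∧ y = 12) := by omega
  simp [this]

-- getD after setIfInBounds, one level
theorem pvGetD_set {α : Type} (a : Array α) (i j : Nat) (v d : α) (hi : i < a.size) :
    (a.setIfInBounds i v).getD j d = if j = i then v else a.getD j d := by
  rw [Array.getD_eq_getD_getElem?, Array.getD_eq_getD_getElem?,
    Array.getElem?_setIfInBounds]
  by_cases h : i = j
  · subst h; rw [if_pos rfl, if_pos rfl, if_pos hi]; rfl
  · rw [if_neg h, if_neg (Ne.symm h)]

theorem pvGetD_toArray {α : Type} (l : List α) (x : Nat) (d : α) :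
    (l.toArray).getD x d = l.getD x d := by
  rw [Array.getD_eq_getD_getElem?, List.getElem?_toArray, List.getD_eq_getElem?_getD]

-- table dimension invariant
def pvDims (dp : Array (Array (Array Int))) (m : Nat) : Prop :=
  dp.size = 25 ∧ ∀ x, x < 25 → (dp.getD x #[]).size = 25 ∧
    ∀ y, y < 25 → ((dp.getD x #[]).getD y #[]).size = m

theorem pvDims_set3 (dp : Array (Array (Array Int))) (m : Nat) (hd : pvDims dp m)
    (a b c : Nat) (v : Int) (ha : a < 25) (hb : b < 25) :
    pvDims (pvSet3 dp a b c v) m := by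
  obtain ⟨h25, hrow⟩ := hd
  refine ⟨by simp [pvSet3, h25], fun x hx => ?_⟩
  rw [pvSet3, pvGetD_set _ _ _ _ _ (by omega)]
  by_cases hxa : x = a
  · subst hxa
    rw [if_pos rfl]
    constructor
    · rw [Array.size_setIfInBounds]; exact (hrow x hx).1
    · intro y hy
      rw [pvGetD_set _ _ _ _ _ (by rw [(hrow x hx).1]; omega)]
      by_cases hyb : y = b
      · subst hyb; rw [if_pos rfl, Array.size_setIfInBounds]; exact (hrow x hx).2 y hy
      · rw [if_neg hyb]; exact (hrow x hx).2 y hy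
  · rw [if_neg hxa]; exact hrow x hx

theorem pvGet3_set3 (dp : Array (Array (Array Int))) (m : Nat) (hd : pvDims dp m)
    (a b c x y z : Nat) (v : Int) (ha : a < 25) (hb : b < 25) (hc : c < m)
    (hx : x < 25) (hy : y < 25) :
    pvGet3 (pvSet3 dp a b c v) x y z =
      if x = a ∧ y = b ∧ z = c then v else pvGet3 dp x y z := by
  obtain ⟨h25, hrow⟩ := hd
  rw [pvGet3, pvSet3, pvGetD_set _ _ _ _ _ (by omega)]
  by_cases hxa : x = a
  · subst hxa
    rw [if_pos rfl, pvGetD_set _ _ _ _ _ (by rw [(hrow x hx).1]; omega)]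
    by_cases hyb : y = b
    · subst hyb
      rw [if_pos rfl, pvGetD_set _ _ _ _ _ (by rw [(hrow x hx).2 y hy]; omega)]
      by_cases hzc : z = c
      · subst hzc; simp
      · simp [hzc, pvGet3]
    · simp [hyb, pvGet3]
  · simp [hxa, pvGet3]

-- pvGather only reads layer (steps-1): congruence under agreement there
theorem pvGather_congr (dp dp' : Array (Array (Array Int))) (x y steps : Int)
    (h : ∀ a b : Nat, a < 25 → b < 25 →
      pvGet3 dp' a b (steps - 1).toNat = pvGet3 dp a b (steps - 1).toNat) :
    pvGather dp' x y steps = pvGather dp x y steps := by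
  unfold pvGather
  apply PySem.List.foldl_congr_mem
  intro acc d _
  by_cases hc : 0 ≤ x + d.1 ∧ x + d.1 < 25 ∧ 0 ≤ y + d.2 ∧ y + d.2 < 25
  · rw [if_pos hc, if_pos hc, h _ _ (by omega) (by omega)]
  · rw [if_neg hc, if_neg hc]

-- the inner y-loop of one step of A
theorem pvInner (m : Nat) (L : Int) (hL : 1 ≤ L) (hm : L.toNat < m)
    (x : Int) (hx0 : 0 ≤ x) (hx : x < 25) :
    ∀ (ys : List Int), (∀ y ∈ ys, 0 ≤ y ∧ y < 25) →
    ∀ (dp : Array (Array (Array Int))), pvDims dp m →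
      pvDims (ys.foldl (fun dp y =>
        pvSet3 dp x.toNat y.toNat L.toNat (pvGather dp x y L)) dp) m ∧
      ∀ (a b z : Nat), a < 25 → b < 25 → z < m →
        pvGet3 (ys.foldl (fun dp y =>
          pvSet3 dp x.toNat y.toNat L.toNat (pvGather dp x y L)) dp) a b z =
          if a = x.toNat ∧ (b : Int) ∈ ys ∧ z = L.toNat then pvGather dp x (b : Int) L
          else pvGet3 dp a b z := by
  intro ys
  induction ys with
  | nil => intro _ dp hd; exact ⟨hd, fun a b z _ _ _ => by simp⟩
  | cons y ys ih =>
    intro hmem dp hd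
    have hy := hmem y (List.mem_cons_self)
    have hd' : pvDims (pvSet3 dp x.toNat y.toNat L.toNat (pvGather dp x y L)) m :=
      pvDims_set3 dp m hd _ _ _ _ (by omega) (by omega)
    obtain ⟨ihd, ihget⟩ := ih (fun y' hy' => hmem y' (List.mem_cons_of_mem _ hy')) _ hd'
    rw [List.foldl_cons]
    refine ⟨ihd, fun a b z ha hb hz => ?_⟩
    rw [ihget a b z ha hb hz]
    have hstab : ∀ (b' : Int),
        pvGather (pvSet3 dp x.toNat y.toNat L.toNat (pvGather dp x y L)) x b' L =
          pvGather dp x b' L := by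
      intro b'
      apply pvGather_congr
      intro a' b'' ha' hb''
      rw [pvGet3_set3 dp m hd _ _ _ _ _ _ _ (by omega) (by omega) hm ha' hb'',
        if_neg (by omega)]
    by_cases h1 : a = x.toNat ∧ (b : Int) ∈ ys ∧ z = L.toNat
    · rw [if_pos h1, if_pos ⟨h1.1, List.mem_cons_of_mem _ h1.2.1, h1.2.2⟩, hstab]
    · rw [if_neg h1,
        pvGet3_set3 dp m hd _ _ _ a b z _ (by omega) (by omega) hm ha hb]
      by_cases h2 : a = x.toNat ∧ b = y.toNat ∧ z = L.toNat
      · have hby : (b : Int) = y := by omega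
        rw [if_pos h2, if_pos ⟨h2.1, by rw [hby]; exact List.mem_cons_self, h2.2.2⟩, hby]
      · rw [if_neg h2]
        rw [if_neg ?hneg]
        case hneg =>
          rintro ⟨hax, hbmem, hzL⟩
          rcases List.mem_cons.mp hbmem with hby | hbys
          · exact h2 ⟨hax, by omega, hzL⟩
          · exact h1 ⟨hax, hbys, hzL⟩

-- the outer x-loop of one step of A
theorem pvOuter (m : Nat) (L : Int) (hL : 1 ≤ L) (hm : L.toNat < m) :
    ∀ (xs : List Int), (∀ x ∈ xs, 0 ≤ x ∧ x < 25) →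
    ∀ (dp : Array (Array (Array Int))), pvDims dp m →
      pvDims (xs.foldl (fun dp x => (PySem.List.pyRange 0 25 1).foldl (fun dp y =>
        pvSet3 dp x.toNat y.toNat L.toNat (pvGather dp x y L)) dp) dp) m ∧
      ∀ (a b z : Nat), a < 25 → b < 25 → z < m →
        pvGet3 (xs.foldl (fun dp x => (PySem.List.pyRange 0 25 1).foldl (fun dp y =>
          pvSet3 dp x.toNat y.toNat L.toNat (pvGather dp x y L)) dp) dp) a b z =
          if (a : Int) ∈ xs ∧ z = L.toNat then pvGather dp (a : Int) (b : Int) L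
          else pvGet3 dp a b z := by
  intro xs
  induction xs with
  | nil => intro _ dp hd; exact ⟨hd, fun a b z _ _ _ => by simp⟩
  | cons x xs ih =>
    intro hmem dp hd
    have hx := hmem x (List.mem_cons_self)
    have hyr : ∀ y ∈ PySem.List.pyRange 0 25 1, 0 ≤ y ∧ y < 25 := by
      intro y hy; exact PySem.List.mem_pyRange_one.mp hy
    obtain ⟨hd', hget'⟩ := pvInner m L hL hm x hx.1 hx.2 _ hyr dp hd
    obtain ⟨ihd, ihget⟩ := ih (fun x' hx' => hmem x' (List.mem_cons_of_mem _ hx')) _ hd'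
    rw [List.foldl_cons]
    refine ⟨ihd, fun a b z ha hb hz => ?_⟩
    rw [ihget a b z ha hb hz]
    have hstab : ∀ (a' b' : Int),
        pvGather ((PySem.List.pyRange 0 25 1).foldl (fun dp y =>
          pvSet3 dp x.toNat y.toNat L.toNat (pvGather dp x y L)) dp) a' b' L =
          pvGather dp a' b' L := by
      intro a' b'
      apply pvGather_congr
      intro a'' b'' ha'' hb''
      rw [hget' a'' b'' (L - 1).toNat ha'' hb'' (by omega), if_neg (by omega)]
    by_cases h1 : (a : Int) ∈ xs ∧ z = L.toNat
    · rw [if_pos h1, if_pos ⟨List.mem_cons_of_mem _ h1.1, h1.2⟩, hstab]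
    · rw [if_neg h1, hget' a b z ha hb hz]
      by_cases h2 : a = x.toNat ∧ (b : Int) ∈ PySem.List.pyRange 0 25 1 ∧ z = L.toNat
      · have hax : (a : Int) = x := by omega
        rw [if_pos h2, if_pos ⟨by rw [hax]; exact List.mem_cons_self, h2.2.2⟩, hax]
      · rw [if_neg h2]
        rw [if_neg ?hneg]
        case hneg =>
          rintro ⟨hamem, hzL⟩
          rcases List.mem_cons.mp hamem with hax | haxs
          · exact h2 ⟨by omega, PySem.List.mem_pyRange_one.mpr (by omega), hzL⟩
          · exact h1 ⟨haxs, hzL⟩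

-- one full 'steps' iteration of A
theorem pvStepA_get3 (m : Nat) (L : Int) (hL : 1 ≤ L) (hm : L.toNat < m)
    (dp : Array (Array (Array Int))) (hd : pvDims dp m) :
    pvDims (pvStepA dp L) m ∧
    ∀ (a b z : Nat), a < 25 → b < 25 → z < m →
      pvGet3 (pvStepA dp L) a b z =
        if z = L.toNat then pvGather dp (a : Int) (b : Int) L else pvGet3 dp a b z := by
  have hxr : ∀ x ∈ PySem.List.pyRange 0 25 1, 0 ≤ x ∧ x < 25 := by
    intro x hx; exact PySem.List.mem_pyRange_one.mp hx
  obtain ⟨hd', hget'⟩ := pvOuter m L hL hm _ hxr dp hd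
  refine ⟨hd', fun a b z ha hb hz => ?_⟩
  rw [pvStepA, hget' a b z ha hb hz]
  have : (a : Int) ∈ PySem.List.pyRange 0 25 1 := PySem.List.mem_pyRange_one.mpr (by omega)
  by_cases hzL : z = L.toNat
  · rw [if_pos ⟨this, hzL⟩, if_pos hzL]
  · rw [if_neg (fun h => hzL h.2), if_neg hzL]

-- the table after 'dp[12][12][0] = 1'
def pvDP1 (n : Int) : Array (Array (Array Int)) :=
  pvSet3 (((PySem.List.pyRange 0 25 1).map (fun _ =>
    ((PySem.List.pyRange 0 25 1).map (fun _ =>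
      Array.replicate (n + 1).toNat (0 : Int))).toArray)).toArray) 12 12 0 1

theorem pvLen25 : (PySem.List.pyRange 0 25 1).length = 25 := by
  rw [PySem.List.length_pyRange_one]; rfl

theorem pvGet3_dp0 (n : Int) (x y z : Nat) :
    pvGet3 (((PySem.List.pyRange 0 25 1).map (fun _ =>
      ((PySem.List.pyRange 0 25 1).map (fun _ =>
        Array.replicate (n + 1).toNat (0 : Int))).toArray)).toArray) x y z = 0 := by
  simp only [pvGet3, Array.getD_eq_getD_getElem?, List.getElem?_toArray, List.getElem?_map]
  rcases Nat.lt_or_ge x ((PySem.List.pyRange 0 25 1).length) with h | h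
  · rw [List.getElem?_eq_getElem h]
    simp only [Option.map_some, Option.getD_some, List.getElem?_toArray, List.getElem?_map]
    rcases Nat.lt_or_ge y ((PySem.List.pyRange 0 25 1).length) with h2 | h2
    · rw [List.getElem?_eq_getElem h2]
      simp only [Option.map_some, Option.getD_some, Array.getElem?_replicate]
      split <;> rfl
    · rw [List.getElem?_eq_none (by omega)]; rfl
  · rw [List.getElem?_eq_none (by omega)]; rfl

theorem pvDims_dp0 (n : Int) :
    pvDims (((PySem.List.pyRange 0 25 1).map (fun _ =>
      ((PySem.List.pyRange 0 25 1).map (fun _ =>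
        Array.replicate (n + 1).toNat (0 : Int))).toArray)).toArray) ((n + 1).toNat) := by
  have hx25 : ∀ x : Nat, x < 25 → x < ((PySem.List.pyRange 0 25 1).map (fun _ =>
      ((PySem.List.pyRange 0 25 1).map (fun _ =>
        Array.replicate (n + 1).toNat (0 : Int))).toArray)).length := by
    intro x hx; rw [List.length_map, pvLen25]; omega
  refine ⟨by rw [List.size_toArray, List.length_map, pvLen25], fun x hx => ?_⟩
  rw [pvGetD_toArray, List.getD_eq_getElem _ _ (hx25 x hx), List.getElem_map]
  refine ⟨by rw [List.size_toArray, List.length_map, pvLen25], fun y hy => ?_⟩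
  rw [pvGetD_toArray, List.getD_eq_getElem _ _ (by rw [List.length_map, pvLen25]; omega),
    List.getElem_map, Array.size_replicate]

theorem pvDims_dp1 (n : Int) : pvDims (pvDP1 n) ((n + 1).toNat) :=
  pvDims_set3 _ _ (pvDims_dp0 n) _ _ _ _ (by omega) (by omega)

theorem pvGet3_dp1 (n : Int) (hn : 0 ≤ n) (x y z : Nat) (hx : x < 25) (hy : y < 25) :
    pvGet3 (pvDP1 n) x y z = if x = 12 ∧ y = 12 ∧ z = 0 then 1 else 0 := by
  rw [pvDP1, pvGet3_set3 _ _ (pvDims_dp0 n) _ _ _ _ _ _ _ (by omega) (by omega)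
    (by omega) hx hy]
  by_cases h : x = 12 ∧ y = 12 ∧ z = 0
  · rw [if_pos h, if_pos h]
  · rw [if_neg h, if_neg h, pvGet3_dp0]

-- A's hand-written accumulation as a sum over the direction list
theorem pvGather_eq_sum (dp : Array (Array (Array Int))) (x y steps : Int) :
    pvGather dp x y steps = (pvDirs.map (fun d =>
      if 0 ≤ x + d.1 ∧ x + d.1 < 25 ∧ 0 ≤ y + d.2 ∧ y + d.2 < 25 then
        pvGet3 dp (x + d.1).toNat (y + d.2).toNat (steps - 1).toNat
      else 0)).sum := by
  unfold pvGather
  have h1 := PySem.List.foldl_congr_mem (l := pvDirs) (init := (0 : Int))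
    (f := fun acc d => if 0 ≤ x + d.1 ∧ x + d.1 < 25 ∧ 0 ≤ y + d.2 ∧ y + d.2 < 25 then
      acc + pvGet3 dp (x + d.1).toNat (y + d.2).toNat (steps - 1).toNat else acc)
    (g := fun acc d => acc + (if 0 ≤ x + d.1 ∧ x + d.1 < 25 ∧ 0 ≤ y + d.2 ∧ y + d.2 < 25 then
      pvGet3 dp (x + d.1).toNat (y + d.2).toNat (steps - 1).toNat else 0))
    (by intro acc d _; beta_reduce; split <;> simp)
  rw [h1, PySem.List.foldl_add]
  simp

-- the table after the first s iterations of A's 'steps' loop computes pvG, layer by layer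
theorem pvLayers (n : Int) (hn : 0 ≤ n) (s : Nat) (hs : (s : Int) ≤ n) :
    pvDims ((PySem.List.pyRange 1 ((s : Int) + 1) 1).foldl pvStepA (pvDP1 n)) ((n + 1).toNat) ∧
    ∀ (x y t : Nat), x < 25 → y < 25 → t ≤ s →
      pvGet3 ((PySem.List.pyRange 1 ((s : Int) + 1) 1).foldl pvStepA (pvDP1 n)) x y t =
        pvG t (x : Int) (y : Int) := by
  induction s with
  | zero =>
    rw [show ((0 : Nat) : Int) + 1 = 1 by rfl, PySem.List.pyRange_one_eq_nil (by omega),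
      List.foldl_nil]
    refine ⟨pvDims_dp1 n, fun x y t hx hy ht => ?_⟩
    have ht0 : t = 0 := by omega
    subst ht0
    rw [pvGet3_dp1 n hn x y 0 hx hy]
    by_cases h : x = 12 ∧ y = 12
    · rw [if_pos ⟨h.1, h.2, rfl⟩]
      simp only [pvG]
      rw [if_pos (by omega)]
    · rw [if_neg (by tauto)]
      simp only [pvG]
      rw [if_neg (by omega)]
  | succ s ih =>
    obtain ⟨ihd, ihget⟩ := ih (by omega)
    rw [show ((s + 1 : Nat) : Int) + 1 = ((s : Int) + 1) + 1 by push_cast; ring,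
      PySem.List.pyRange_one_succ_right (by omega), List.foldl_append, List.foldl_cons,
      List.foldl_nil]
    obtain ⟨hd', hget'⟩ := pvStepA_get3 ((n + 1).toNat) ((s : Int) + 1) (by omega)
      (by omega) _ ihd
    refine ⟨hd', fun x y t hx hy ht => ?_⟩
    rw [hget' x y t hx hy (by omega)]
    by_cases hts : t = s + 1
    · rw [if_pos (by omega), pvGather_eq_sum]
      subst hts
      have hgrid : (0 : Int) ≤ (x : Int) ∧ (x : Int) < 25 ∧ (0 : Int) ≤ (y : Int) ∧
          (y : Int) < 25 := by omega
      rw [show pvG (s + 1) (x : Int) (y : Int) =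
        (pvDirs.map (fun d => pvG s ((x : Int) + d.1) ((y : Int) + d.2))).sum from by
          simp only [pvG]; rw [if_pos hgrid]]
      congr 1
      apply List.map_congr_left
      intro d _
      by_cases hc : 0 ≤ (x : Int) + d.1 ∧ (x : Int) + d.1 < 25 ∧ 0 ≤ (y : Int) + d.2 ∧
          (y : Int) + d.2 < 25
      · rw [if_pos hc, show ((s : Int) + 1 - 1).toNat = s by omega,
          ihget ((x : Int) + d.1).toNat ((y : Int) + d.2).toNat s (by omega) (by omega)
            (le_refl s),
          Int.toNat_of_nonneg hc.1, Int.toNat_of_nonneg hc.2.2.1]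
      · rw [if_neg hc, (pvG_out s _ _ hc).symm]
    · rw [if_neg (by omega), ihget x y t hx hy (by omega)]

-- A computes pvG n 12 12
theorem pvCountA (n : Int) (hn : 0 ≤ n) : count_walks n = pvG n.toNat 12 12 := by
  have hcast : ((n.toNat : Int)) = n := Int.toNat_of_nonneg hn
  obtain ⟨_, hget⟩ := pvLayers n hn n.toNat (by omega)
  rw [hcast] at hget
  unfold count_walks
  rw [show pvDP1 n = pvSet3 (((PySem.List.pyRange 0 25 1).map (fun _ =>
    ((PySem.List.pyRange 0 25 1).map (fun _ =>
      Array.replicate (n + 1).toNat (0 : Int))).toArray)).toArray) 12 12 0 1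
    from rfl] at hget
  have := hget 12 12 n.toNat (by omega) (by omega) (le_refl _)
  simpa using this

-- ===== B-side lemmas =====

-- grid dimension invariant
def pvDims2 (g : Array (Array Int)) : Prop :=
  g.size = 25 ∧ ∀ x, x < 25 → (g.getD x #[]).size = 25

theorem pvDims2_set2 (g : Array (Array Int)) (hd : pvDims2 g)
    (a b : Nat) (v : Int) (ha : a < 25) :
    pvDims2 (pvSet2 g a b v) := by
  obtain ⟨h25, hrow⟩ := hd
  refine ⟨by simp [pvSet2, h25], fun x hx => ?_⟩
  rw [pvSet2, pvGetD_set _ _ _ _ _ (by omega)]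
  by_cases hxa : x = a
  · subst hxa; rw [if_pos rfl, Array.size_setIfInBounds]; exact hrow x hx
  · rw [if_neg hxa]; exact hrow x hx

theorem pvGet2_set2 (g : Array (Array Int)) (hd : pvDims2 g)
    (a b x y : Nat) (v : Int) (ha : a < 25) (hb : b < 25) (hx : x < 25) :
    pvGet2 (pvSet2 g a b v) x y = if x = a ∧ y = b then v else pvGet2 g x y := by
  obtain ⟨h25, hrow⟩ := hd
  rw [pvGet2, pvSet2, pvGetD_set _ _ _ _ _ (by omega)]
  by_cases hxa : x = a
  · subst hxa
    rw [if_pos rfl, pvGetD_set _ _ _ _ _ (by rw [hrow x hx]; omega)]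
    by_cases hyb : y = b
    · subst hyb; simp
    · simp [hyb, pvGet2]
  · simp [hxa, pvGet2]

theorem pvGet2_zeros (x y : Nat) : pvGet2 pvZeros x y = 0 := by
  simp only [pvGet2, pvZeros, Array.getD_eq_getD_getElem?, List.getElem?_toArray,
    List.getElem?_map]
  rcases Nat.lt_or_ge x ((PySem.List.pyRange 0 25 1).length) with h | h
  · rw [List.getElem?_eq_getElem h]
    simp only [Option.map_some, Option.getD_some, Array.getElem?_replicate]
    split <;> rfl
  · rw [List.getElem?_eq_none (by omega)]; rfl

theorem pvDims2_zeros : pvDims2 pvZeros := by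
  refine ⟨by rw [pvZeros, List.size_toArray, List.length_map, pvLen25], fun x hx => ?_⟩
  rw [pvZeros, pvGetD_toArray, List.getD_eq_getElem _ _ (by
      rw [List.length_map, pvLen25]; omega),
    List.getElem_map, Array.size_replicate]

-- the contribution one source cell (x,y) scatters onto target (a,b)
def pvContribB (cur : Array (Array Int)) (x y : Int) (a b : Nat) : Int :=
  (pvDirs.map (fun d =>
    if (0 ≤ x + d.1 ∧ x + d.1 < 25 ∧ 0 ≤ y + d.2 ∧ y + d.2 < 25) ∧
        x + d.1 = (a : Int) ∧ y + d.2 = (b : Int) then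
      pvGet2 cur x.toNat y.toNat
    else 0)).sum

-- pvPush adds exactly the contributions of (x,y) into nxt
theorem pvPush_get2 (cur : Array (Array Int)) (x y : Int) :
    ∀ (nxt : Array (Array Int)), pvDims2 nxt →
      pvDims2 (pvPush cur nxt x y) ∧
      ∀ (a b : Nat), a < 25 → b < 25 →
        pvGet2 (pvPush cur nxt x y) a b = pvGet2 nxt a b + pvContribB cur x y a b := by
  have key : ∀ (ds : List (Int × Int)) (nxt : Array (Array Int)), pvDims2 nxt →
      pvDims2 (ds.foldl (fun nxt d =>
        if 0 ≤ x + d.1 ∧ x + d.1 < 25 ∧ 0 ≤ y + d.2 ∧ y + d.2 < 25 then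
          pvSet2 nxt (x + d.1).toNat (y + d.2).toNat
            (pvGet2 nxt (x + d.1).toNat (y + d.2).toNat + pvGet2 cur x.toNat y.toNat)
        else nxt) nxt) ∧
      ∀ (a b : Nat), a < 25 → b < 25 →
        pvGet2 (ds.foldl (fun nxt d =>
          if 0 ≤ x + d.1 ∧ x + d.1 < 25 ∧ 0 ≤ y + d.2 ∧ y + d.2 < 25 then
            pvSet2 nxt (x + d.1).toNat (y + d.2).toNat
              (pvGet2 nxt (x + d.1).toNat (y + d.2).toNat + pvGet2 cur x.toNat y.toNat)
          else nxt) nxt) a b =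
          pvGet2 nxt a b + (ds.map (fun d =>
            if (0 ≤ x + d.1 ∧ x + d.1 < 25 ∧ 0 ≤ y + d.2 ∧ y + d.2 < 25) ∧
                x + d.1 = (a : Int) ∧ y + d.2 = (b : Int) then
              pvGet2 cur x.toNat y.toNat
            else 0)).sum := by
    intro ds
    induction ds with
    | nil => intro nxt hd; exact ⟨hd, fun a b _ _ => by simp⟩
    | cons d ds ih =>
      intro nxt hd
      rw [List.foldl_cons]
      by_cases hc : 0 ≤ x + d.1 ∧ x + d.1 < 25 ∧ 0 ≤ y + d.2 ∧ y + d.2 < 25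
      · rw [if_pos hc]
        have hd' : pvDims2 (pvSet2 nxt (x + d.1).toNat (y + d.2).toNat
            (pvGet2 nxt (x + d.1).toNat (y + d.2).toNat + pvGet2 cur x.toNat y.toNat)) :=
          pvDims2_set2 nxt hd _ _ _ (by omega)
        obtain ⟨ihd, ihget⟩ := ih _ hd'
        refine ⟨ihd, fun a b ha hb => ?_⟩
        rw [ihget a b ha hb,
          pvGet2_set2 nxt hd _ _ a b _ (by omega) (by omega) ha,
          List.map_cons, List.sum_cons]
        by_cases hab : a = (x + d.1).toNat ∧ b = (y + d.2).toNat
        · obtain ⟨ha1, hb1⟩ := hab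
          subst ha1; subst hb1
          rw [if_pos ⟨rfl, rfl⟩, if_pos ⟨hc, by omega, by omega⟩]; ring
        · rw [if_neg hab, if_neg (fun h => hab ⟨by omega, by omega⟩)]; ring
      · rw [if_neg hc]
        obtain ⟨ihd, ihget⟩ := ih _ hd
        refine ⟨ihd, fun a b ha hb => ?_⟩
        rw [ihget a b ha hb, List.map_cons, List.sum_cons,
          if_neg (fun h => hc h.1)]
        ring
  intro nxt hd
  simp only [pvPush]
  by_cases hc0 : pvGet2 cur x.toNat y.toNat ≠ 0
  · rw [if_pos hc0]
    obtain ⟨kd, kget⟩ := key pvDirs nxt hd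
    exact ⟨kd, fun a b ha hb => by rw [kget a b ha hb]; rfl⟩
  · rw [if_neg hc0]
    refine ⟨hd, fun a b ha hb => ?_⟩
    have hz : pvContribB cur x y a b = 0 := by
      apply List.sum_eq_zero
      intro v hv
      obtain ⟨d, _, hv'⟩ := List.mem_map.mp hv
      rw [← hv']
      split
      · simpa using hc0
      · rfl
    simp [hz]

theorem pvSumFlatMap {α β : Type} (l : List α) (g : α → List β) (f : β → Int) :
    ((l.flatMap g).map f).sum = (l.map (fun x => ((g x).map f).sum)).sum := by
  induction l with
  | nil => simp
  | cons a t ih => simp [List.flatMap_cons, ih]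

theorem pvSumComm {α β : Type} (l : List α) (m : List β) (f : α → β → Int) :
    (l.map (fun a => (m.map (f a)).sum)).sum =
      (m.map (fun b => (l.map (fun a => f a b)).sum)).sum := by
  induction l with
  | nil => simp
  | cons a t ih =>
    simp only [List.map_cons, List.sum_cons]
    rw [ih, ← PySem.List.sum_map_add_int]

-- a sum of point indicators over a duplicate-free list picks out the hit
theorem pvSumIte (l : List Int) (hl : l.Nodup) (t : Int) (f : Int → Int) :
    (l.map (fun x => if x = t then f x else 0)).sum = if t ∈ l then f t else 0 := by
  induction l with
  | nil => simp
  | cons a s ih =>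
    obtain ⟨hna, hns⟩ := List.nodup_cons.mp hl
    rw [List.map_cons, List.sum_cons, ih hns]
    by_cases hat : a = t
    · subst hat
      rw [if_pos rfl, if_neg hna, if_pos List.mem_cons_self]
      ring
    · rw [if_neg hat]
      by_cases ht : t ∈ s
      · rw [if_pos ht, if_pos (List.mem_cons_of_mem _ ht), zero_add]
      · rw [if_neg ht, zero_add, if_neg (by
          intro hmem
          rcases List.mem_cons.mp hmem with h | h
          · exact hat h.symm
          · exact ht h)]

-- direction set closed under negation: gathering from q-d equals gathering from q+d
theorem pvDirsSymm (f : Int → Int → Int) (qx qy : Int) :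
    (pvDirs.map (fun d => f (qx - d.1) (qy - d.2))).sum =
      (pvDirs.map (fun d => f (qx + d.1) (qy + d.2))).sum := by
  simp only [pvDirs, List.map_cons, List.map_nil, List.sum_cons, List.sum_nil]
  norm_num
  ring_nf

-- the cells double loop of one B step, flattened over a list of source cells
theorem pvCells (cur : Array (Array Int)) :
    ∀ (ps : List (Int × Int)) (nxt : Array (Array Int)), pvDims2 nxt →
      pvDims2 (ps.foldl (fun nxt p => pvPush cur nxt p.1 p.2) nxt) ∧
      ∀ (a b : Nat), a < 25 → b < 25 →
        pvGet2 (ps.foldl (fun nxt p => pvPush cur nxt p.1 p.2) nxt) a b =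
          pvGet2 nxt a b + (ps.map (fun p => pvContribB cur p.1 p.2 a b)).sum := by
  intro ps
  induction ps with
  | nil => intro nxt hd; exact ⟨hd, fun a b _ _ => by simp⟩
  | cons p ps ih =>
    intro nxt hd
    rw [List.foldl_cons]
    obtain ⟨hd', hget'⟩ := pvPush_get2 cur p.1 p.2 nxt hd
    obtain ⟨ihd, ihget⟩ := ih _ hd'
    refine ⟨ihd, fun a b ha hb => ?_⟩
    rw [ihget a b ha hb, hget' a b ha hb, List.map_cons, List.sum_cons]
    ring

-- the inner y-loop of one B step, as a fold over (x, y) pairs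
theorem pvRowFold (cur : Array (Array Int)) (x : Int) :
    ∀ (ys : List Int) (z : Array (Array Int)),
      ys.foldl (fun nxt y => pvPush cur nxt x y) z =
        (ys.map (fun y => (x, y))).foldl (fun nxt p => pvPush cur nxt p.1 p.2) z := by
  intro ys
  induction ys with
  | nil => intro z; simp
  | cons y ys ih =>
    intro z
    rw [List.foldl_cons, List.map_cons, List.foldl_cons, ih]

-- the nested x/y loops, as a fold over the flattened cell list
theorem pvGridFold (cur : Array (Array Int)) :
    ∀ (xs ys : List Int) (z : Array (Array Int)),
      xs.foldl (fun nxt x => ys.foldl (fun nxt y => pvPush cur nxt x y) nxt) z =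
        (xs.flatMap (fun x => ys.map (fun y => (x, y)))).foldl
          (fun nxt p => pvPush cur nxt p.1 p.2) z := by
  intro xs
  induction xs with
  | nil => intro ys z; simp
  | cons x xs ih =>
    intro ys z
    rw [List.foldl_cons, ih, pvRowFold cur x ys z, List.flatMap_cons, List.foldl_append]

-- one B step: the nested x/y loops as a fold over the flattened cell list
theorem pvStepB_eq (cur : Array (Array Int)) :
    pvStepB cur = ((PySem.List.pyRange 0 25 1).flatMap (fun x =>
      (PySem.List.pyRange 0 25 1).map (fun y => (x, y)))).foldl
      (fun nxt p => pvPush cur nxt p.1 p.2) pvZeros := by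
  rw [pvStepB, pvGridFold]

-- B's step satisfies the same recurrence as pvG
theorem pvStepB_val (cur : Array (Array Int)) (_hcur : pvDims2 cur) (s : Nat)
    (hval : ∀ x y : Nat, x < 25 → y < 25 → pvGet2 cur x y = pvG s (x : Int) (y : Int)) :
    pvDims2 (pvStepB cur) ∧
    ∀ (a b : Nat), a < 25 → b < 25 →
      pvGet2 (pvStepB cur) a b = pvG (s + 1) (a : Int) (b : Int) := by
  rw [pvStepB_eq]
  obtain ⟨hd, hget⟩ := pvCells cur ((PySem.List.pyRange 0 25 1).flatMap (fun x =>
    (PySem.List.pyRange 0 25 1).map (fun y => (x, y)))) pvZeros pvDims2_zeros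
  refine ⟨hd, fun a b ha hb => ?_⟩
  rw [hget a b ha hb, pvGet2_zeros, zero_add]
  -- flatten the cell sum into the double sum, then swap with the direction sum
  have h1 : (((PySem.List.pyRange 0 25 1).flatMap (fun x =>
      (PySem.List.pyRange 0 25 1).map (fun y => (x, y)))).map
        (fun p => pvContribB cur p.1 p.2 a b)).sum =
      ((PySem.List.pyRange 0 25 1).map (fun x =>
        ((PySem.List.pyRange 0 25 1).map (fun y => pvContribB cur x y a b)).sum)).sum := by
    rw [pvSumFlatMap]
    simp only [List.map_map]
    rfl
  rw [h1]
  -- for each source cell, expose the direction sum and swap summation order twice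
  have h2 : ∀ x : Int, ((PySem.List.pyRange 0 25 1).map
      (fun y => pvContribB cur x y a b)).sum =
      (pvDirs.map (fun d => ((PySem.List.pyRange 0 25 1).map (fun y =>
        if (0 ≤ x + d.1 ∧ x + d.1 < 25 ∧ 0 ≤ y + d.2 ∧ y + d.2 < 25) ∧
            x + d.1 = (a : Int) ∧ y + d.2 = (b : Int) then
          pvGet2 cur x.toNat y.toNat
        else 0)).sum)).sum := by
    intro x
    rw [← pvSumComm]
    rfl
  rw [List.map_congr_left (fun x _ => h2 x), pvSumComm]
  -- for a fixed direction d, the double indicator sum picks the single source cell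
  have h3 : ∀ d : Int × Int, d ∈ pvDirs →
      ((PySem.List.pyRange 0 25 1).map (fun x =>
        ((PySem.List.pyRange 0 25 1).map (fun y =>
          if (0 ≤ x + d.1 ∧ x + d.1 < 25 ∧ 0 ≤ y + d.2 ∧ y + d.2 < 25) ∧
              x + d.1 = (a : Int) ∧ y + d.2 = (b : Int) then
            pvGet2 cur x.toNat y.toNat
          else 0)).sum)).sum = pvG s ((a : Int) - d.1) ((b : Int) - d.2) := by
    intro d _
    have hinner : ∀ x : Int, ((PySem.List.pyRange 0 25 1).map (fun y =>
        if (0 ≤ x + d.1 ∧ x + d.1 < 25 ∧ 0 ≤ y + d.2 ∧ y + d.2 < 25) ∧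
            x + d.1 = (a : Int) ∧ y + d.2 = (b : Int) then
          pvGet2 cur x.toNat y.toNat
        else 0)).sum =
        if x = (a : Int) - d.1 then
          ((PySem.List.pyRange 0 25 1).map (fun y =>
            if y = (b : Int) - d.2 then pvGet2 cur x.toNat y.toNat else 0)).sum
        else 0 := by
      intro x
      by_cases hx : x = (a : Int) - d.1
      · rw [if_pos hx]
        congr 1
        apply List.map_congr_left
        intro y _
        by_cases hy : y = (b : Int) - d.2
        · rw [if_pos hy, if_pos ⟨⟨by omega, by omega, by omega, by omega⟩, by omega, by omega⟩]
        · rw [if_neg hy, if_neg (fun h => hy (by omega))]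
      · rw [if_neg hx]
        apply List.sum_eq_zero
        intro v hv
        obtain ⟨y, _, hv'⟩ := List.mem_map.mp hv
        rw [← hv', if_neg (fun h => hx (by omega))]
    rw [List.map_congr_left (fun x _ => hinner x),
      pvSumIte _ (PySem.List.nodup_pyRange_one 0 25) ((a : Int) - d.1) _]
    by_cases hin1 : 0 ≤ (a : Int) - d.1 ∧ (a : Int) - d.1 < 25
    · rw [if_pos (PySem.List.mem_pyRange_one.mpr (by omega)),
        pvSumIte _ (PySem.List.nodup_pyRange_one 0 25) ((b : Int) - d.2) _]
      by_cases hin2 : 0 ≤ (b : Int) - d.2 ∧ (b : Int) - d.2 < 25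
      · rw [if_pos (PySem.List.mem_pyRange_one.mpr (by omega)),
          hval ((a : Int) - d.1).toNat ((b : Int) - d.2).toNat (by omega) (by omega),
          Int.toNat_of_nonneg hin1.1, Int.toNat_of_nonneg hin2.1]
      · rw [if_neg (fun h => hin2 (by
          have := PySem.List.mem_pyRange_one.mp h
          omega))]
        exact (pvG_out s _ _ (by omega)).symm
    · rw [if_neg (fun h => hin1 (by
        have := PySem.List.mem_pyRange_one.mp h
        omega))]
      exact (pvG_out s _ _ (by omega)).symm
  rw [List.map_congr_left h3, pvDirsSymm (fun u v => pvG s u v) (a : Int) (b : Int)]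
  simp only [pvG]
  rw [if_pos (by omega)]

-- the 'for _ in range(k)' loop of B iterates pvStepB
theorem pvIterB (k : Nat) (c : Array (Array Int)) :
    (PySem.List.pyRange 0 (k : Int) 1).foldl (fun cur _ => pvStepB cur) c =
      pvStepB^[k] c := by
  induction k with
  | zero => rw [show ((0 : Nat) : Int) = 0 by rfl, PySem.List.pyRange_one_eq_nil (by omega),
      List.foldl_nil, Function.iterate_zero_apply]
  | succ k ih =>
    rw [show ((k + 1 : Nat) : Int) = (k : Int) + 1 by push_cast; ring,
      PySem.List.pyRange_one_succ_right (by omega), List.foldl_append, ih,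
      List.foldl_cons, List.foldl_nil, Function.iterate_succ_apply']

-- B's grid after s steps holds exactly the layer pvG s
theorem pvLayersB (s : Nat) :
    pvDims2 (pvStepB^[s] (pvSet2 pvZeros 12 12 1)) ∧
    ∀ (x y : Nat), x < 25 → y < 25 →
      pvGet2 (pvStepB^[s] (pvSet2 pvZeros 12 12 1)) x y = pvG s (x : Int) (y : Int) := by
  induction s with
  | zero =>
    refine ⟨pvDims2_set2 _ pvDims2_zeros _ _ _ (by omega), fun x y hx hy => ?_⟩
    rw [Function.iterate_zero_apply,
      pvGet2_set2 _ pvDims2_zeros _ _ x y _ (by omega) (by omega) hx]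
    simp only [pvG]
    by_cases h : x = 12 ∧ y = 12
    · rw [if_pos h, if_pos (by omega)]
    · rw [if_neg h, if_neg (by omega), pvGet2_zeros]
  | succ s ih =>
    obtain ⟨ihd, ihval⟩ := ih
    rw [Function.iterate_succ_apply']
    exact pvStepB_val _ ihd s ihval

-- ===== meet-in-the-middle lemmas =====

-- the dot product of DP layers k and m over the grid
def pvS (k m : Nat) : Int :=
  ((PySem.List.pyRange 0 25 1).map (fun x =>
    ((PySem.List.pyRange 0 25 1).map (fun y => pvG k x y * pvG m x y)).sum)).sum

-- 1-D shift invariance of a product sum over the row, when both factors vanish off 0..24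
theorem pvShift1 (F G : Int → Int) (hF : ∀ z, ¬(0 ≤ z ∧ z < 25) → F z = 0)
    (hG : ∀ z, ¬(0 ≤ z ∧ z < 25) → G z = 0) (d : Int)
    (hd : d = -1 ∨ d = 0 ∨ d = 1) :
    ((PySem.List.pyRange 0 25 1).map (fun z => F (z + d) * G z)).sum =
      ((PySem.List.pyRange 0 25 1).map (fun z => F z * G (z - d))).sum := by
  have hR : PySem.List.pyRange 0 25 1 =
      [0,1,2,3,4,5,6,7,8,9,10,11,12,13,14,15,16,17,18,19,20,21,22,23,24] := by decide
  rcases hd with h | h | h <;> subst h <;>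
    simp only [hR, List.map_cons, List.map_nil, List.sum_cons, List.sum_nil] <;>
    norm_num
  · rw [hF (-1) (by norm_num), hG 25 (by norm_num)]; ring
  · rw [hF 25 (by norm_num), hG (-1) (by norm_num)]; ring

-- self-adjointness of one DP step: moving a step from the m side to the k side
theorem pvAdjoint (k m : Nat) : pvS (k + 1) m = pvS k (m + 1) := by
  unfold pvS
  -- Step 1: expand pvG (k+1) into its direction sum and distribute the product
  have h1 : ∀ x ∈ PySem.List.pyRange 0 25 1,
      ((PySem.List.pyRange 0 25 1).map (fun y => pvG (k + 1) x y * pvG m x y)).sum =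
      (pvDirs.map (fun d => ((PySem.List.pyRange 0 25 1).map (fun y =>
        pvG k (x + d.1) (y + d.2) * pvG m x y)).sum)).sum := by
    intro x hx
    have hxr := PySem.List.mem_pyRange_one.mp hx
    have hin : ∀ y ∈ PySem.List.pyRange 0 25 1,
        pvG (k + 1) x y * pvG m x y =
        (pvDirs.map (fun d => pvG k (x + d.1) (y + d.2) * pvG m x y)).sum := by
      intro y hy
      have hyr := PySem.List.mem_pyRange_one.mp hy
      rw [show pvG (k + 1) x y = (pvDirs.map (fun d => pvG k (x + d.1) (y + d.2))).sum
        from by simp only [pvG]; rw [if_pos (by omega)]]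
      exact (List.sum_map_mul_right _ _ _).symm
    rw [List.map_congr_left hin, pvSumComm]
  rw [List.map_congr_left h1, pvSumComm]
  -- now: sum over d of T d, with T d = Σ_x Σ_y pvG k (x+d1)(y+d2) * pvG m x y
  -- Step 2: per direction, shift both coordinates
  have h2 : ∀ d ∈ pvDirs,
      ((PySem.List.pyRange 0 25 1).map (fun x =>
        ((PySem.List.pyRange 0 25 1).map (fun y =>
          pvG k (x + d.1) (y + d.2) * pvG m x y)).sum)).sum =
      ((PySem.List.pyRange 0 25 1).map (fun x =>
        ((PySem.List.pyRange 0 25 1).map (fun y =>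
          pvG k x y * pvG m (x - d.1) (y - d.2))).sum)).sum := by
    intro d hd
    have hd12 : (d.1 = -1 ∨ d.1 = 0 ∨ d.1 = 1) ∧ (d.2 = -1 ∨ d.2 = 0 ∨ d.2 = 1) := by
      simp only [pvDirs, List.mem_cons, List.not_mem_nil, or_false] at hd
      rcases hd with h|h|h|h|h|h <;> subst h <;> simp
    -- shift y inside each row
    have hy : ∀ x : Int, ((PySem.List.pyRange 0 25 1).map (fun y =>
        pvG k (x + d.1) (y + d.2) * pvG m x y)).sum =
        ((PySem.List.pyRange 0 25 1).map (fun y =>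
          pvG k (x + d.1) y * pvG m x (y - d.2))).sum := by
      intro x
      exact pvShift1 (fun z => pvG k (x + d.1) z) (fun z => pvG m x z)
        (fun z hz => pvG_out _ _ _ (by tauto))
        (fun z hz => pvG_out _ _ _ (by tauto)) d.2 hd12.2
    rw [List.map_congr_left (fun x _ => hy x), pvSumComm]
    -- shift x inside each column
    have hxs : ∀ y : Int, ((PySem.List.pyRange 0 25 1).map (fun x =>
        pvG k (x + d.1) y * pvG m x (y - d.2))).sum =
        ((PySem.List.pyRange 0 25 1).map (fun x =>
          pvG k x y * pvG m (x - d.1) (y - d.2))).sum := by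
      intro y
      exact pvShift1 (fun z => pvG k z y) (fun z => pvG m z (y - d.2))
        (fun z hz => pvG_out _ _ _ (by tauto))
        (fun z hz => pvG_out _ _ _ (by tauto)) d.1 hd12.1
    rw [List.map_congr_left (fun y _ => hxs y), pvSumComm]
  rw [List.map_congr_left h2]
  -- Step 3: replace -d by +d using closure under negation
  have h3 := pvDirsSymm (fun u v => ((PySem.List.pyRange 0 25 1).map (fun x =>
      ((PySem.List.pyRange 0 25 1).map (fun y =>
        pvG k x y * pvG m (x + u) (y + v))).sum)).sum) 0 0
  simp only [sub_eq_add_neg, zero_add] at h3 ⊢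
  rw [h3]
  -- Step 4: fold the direction sum back into pvG (m+1)
  rw [pvSumComm]
  congr 1
  apply List.map_congr_left
  intro x hx
  have hxr := PySem.List.mem_pyRange_one.mp hx
  rw [pvSumComm]
  congr 1
  apply List.map_congr_left
  intro y hy
  have hyr := PySem.List.mem_pyRange_one.mp hy
  rw [show pvG (m + 1) x y = (pvDirs.map (fun d => pvG m (x + d.1) (y + d.2))).sum
    from by simp only [pvG]; rw [if_pos (by omega)]]
  exact PySem.List.sum_map_const_mul_int _ _ _

-- base case: layer 0 is the point mass at the center
theorem pvS_zero (m : Nat) : pvS 0 m = pvG m 12 12 := by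
  unfold pvS
  have hin : ∀ x : Int, ((PySem.List.pyRange 0 25 1).map
      (fun y => pvG 0 x y * pvG m x y)).sum =
      ((PySem.List.pyRange 0 25 1).map
        (fun y => if y = 12 then (if x = 12 then pvG m x y else 0) else 0)).sum := by
    intro x
    congr 1
    apply List.map_congr_left
    intro y _
    simp only [pvG]
    by_cases h : x = 12 ∧ y = 12
    · rw [if_pos h, if_pos h.2, if_pos h.1, one_mul]
    · rw [if_neg h, zero_mul]
      by_cases hy : y = 12
      · rw [if_pos hy, if_neg (fun hx => h ⟨hx, hy⟩)]
      · rw [if_neg hy]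
  rw [List.map_congr_left (fun x _ => hin x)]
  have h12 : (12 : Int) ∈ PySem.List.pyRange 0 25 1 := PySem.List.mem_pyRange_one.mpr (by omega)
  have hout : ∀ x : Int, ((PySem.List.pyRange 0 25 1).map
      (fun y => if y = 12 then (if x = 12 then pvG m x y else 0) else 0)).sum =
      if x = 12 then pvG m x 12 else 0 := by
    intro x
    rw [pvSumIte _ (PySem.List.nodup_pyRange_one 0 25) 12 _, if_pos h12]
  rw [List.map_congr_left (fun x _ => hout x),
    pvSumIte _ (PySem.List.nodup_pyRange_one 0 25) 12 _, if_pos h12]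

-- meet in the middle: a length-(k+m) closed walk splits at step k
theorem pvMeet (k : Nat) : ∀ m : Nat, pvG (k + m) 12 12 = pvS k m := by
  induction k with
  | zero => intro m; rw [Nat.zero_add, pvS_zero]
  | succ k ih =>
    intro m
    rw [show k + 1 + m = k + (m + 1) by omega, ih (m + 1), pvAdjoint]

-- a flattened double sum is the sum of the row sums
theorem pvSumFlat {α : Type} (l : List α) (g : α → List Int) :
    (l.flatMap g).sum = (l.map (fun a => (g a).sum)).sum := by
  induction l with
  | nil => simp
  | cons a t ih => simp [List.flatMap_cons, ih]

-- B computes pvG n 12 12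
theorem pvCountB (n : Int) (hn : 0 ≤ n) : count_walks_alt n = pvG n.toNat 12 12 := by
  have hK : PySem.Int.floordiv n 2 = n / 2 := PySem.Int.floordiv_eq_ediv_of_pos (by omega)
  have hM : PySem.Int.mod n 2 = n % 2 := PySem.Int.mod_eq_emod_of_pos (by omega)
  have hcast : (((n / 2).toNat : Int)) = n / 2 := Int.toNat_of_nonneg (by omega)
  have hval : ∀ (s : Nat) (x y : Int), 0 ≤ x → x < 25 → 0 ≤ y → y < 25 →
      pvGet2 (pvStepB^[s] (pvSet2 pvZeros 12 12 1)) x.toNat y.toNat = pvG s x y := by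
    intro s x y hx0 hx hy0 hy
    have h := (pvLayersB s).2 x.toNat y.toNat (by omega) (by omega)
    rwa [Int.toNat_of_nonneg hx0, Int.toNat_of_nonneg hy0] at h
  simp only [count_walks_alt]
  rw [hK, hM, ← hcast, pvIterB]
  have hother : (if n % 2 ≠ 0 then pvStepB (pvStepB^[(n / 2).toNat] (pvSet2 pvZeros 12 12 1))
        else pvStepB^[(n / 2).toNat] (pvSet2 pvZeros 12 12 1)) =
      pvStepB^[(n / 2).toNat + (if n % 2 ≠ 0 then 1 else 0)] (pvSet2 pvZeros 12 12 1) := by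
    by_cases h : n % 2 ≠ 0
    · rw [if_pos h, if_pos h, Function.iterate_succ_apply']
    · rw [if_neg h, if_neg h, Nat.add_zero]
  rw [hother, pvSumFlat]
  have hrow : ∀ x ∈ PySem.List.pyRange 0 25 1,
      ((PySem.List.pyRange 0 25 1).map (fun y =>
        pvGet2 (pvStepB^[(n / 2).toNat] (pvSet2 pvZeros 12 12 1)) x.toNat y.toNat *
        pvGet2 (pvStepB^[(n / 2).toNat + (if n % 2 ≠ 0 then 1 else 0)]
          (pvSet2 pvZeros 12 12 1)) x.toNat y.toNat)).sum =
      ((PySem.List.pyRange 0 25 1).map (fun y =>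
        pvG ((n / 2).toNat) x y *
        pvG ((n / 2).toNat + (if n % 2 ≠ 0 then 1 else 0)) x y)).sum := by
    intro x hx
    have hxr := PySem.List.mem_pyRange_one.mp hx
    apply congrArg
    apply List.map_congr_left
    intro y hy
    have hyr := PySem.List.mem_pyRange_one.mp hy
    rw [hval _ x y hxr.1 hxr.2 hyr.1 hyr.2, hval _ x y hxr.1 hxr.2 hyr.1 hyr.2]
  rw [List.map_congr_left hrow]
  have hmeet := pvMeet ((n / 2).toNat) ((n / 2).toNat + (if n % 2 ≠ 0 then 1 else 0))
  rw [show (n / 2).toNat + ((n / 2).toNat + (if n % 2 ≠ 0 then 1 else 0)) = n.toNat from by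
    by_cases h : n % 2 ≠ 0
    · rw [if_pos h]; omega
    · rw [if_neg h]; omega] at hmeet
  exact hmeet.symm

-- ===== VERDICT (by name: the statement is the Claim_ definition above) =====
theorem count_walks_spec : Claim_equal_count_walks := by
  intro n _ hpre
  unfold Spec_count_walks
  rw [pvCountA n hpre, pvCountB n hpre]
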